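-- pv_equiv track=rewrite | github.com/justin-thakral/DullyPDF | backend/services/template_api_service.py | _format_ambiguous_template_api_keys
-- ===== SOURCE A (Python) =====
-- from typing import Any, Dict, Iterable, List, Optional
--
-- _MAX_TEMPLATE_API_ERROR_ITEMS = 25
--
-- def _format_ambiguous_template_api_keys(collisions: Dict[str, Iterable[str]]) -> str:
--     formatted: List[str] = []
--     for normalized_key in sorted(collisions):
--         raw_keys = sorted({str(key or "").strip() for key in collisions[normalized_key] if str(key or "").strip()})
--         if raw_keys:
--             formatted.append(f"{normalized_key} [{', '.join(raw_keys)}]")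
--         else:
--             formatted.append(normalized_key)
--     preview = formatted[:_MAX_TEMPLATE_API_ERROR_ITEMS]
--     suffix = f" (+{len(formatted) - len(preview)} more)" if len(formatted) > len(preview) else ""
--     return (
--         "Ambiguous API Fill keys after normalization: "
--         f"{', '.join(preview)}{suffix}. Use exactly one spelling per key."
--     )
-- ===== SOURCE B (Python) =====
-- from typing import Dict, Iterable, List
--
-- _MAX_TEMPLATE_API_ERROR_ITEMS = 25
--
-- def _insert_bounded(best: List[str], key: str) -> None:
--     i = 0
--     while i < len(best) and best[i] <= key:
--         i += 1
--     best.insert(i, key)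
--
-- def _fmt_entry(collisions, normalized_key: str) -> str:
--     raw_keys = sorted({str(key or "").strip() for key in collisions[normalized_key] if str(key or "").strip()})
--     if raw_keys:
--         return f"{normalized_key} [{', '.join(raw_keys)}]"
--     return normalized_key
--
-- def _format_ambiguous_template_api_keys(collisions: Dict[str, Iterable[str]]) -> str:
--     # bounded selection: keep only the 25 smallest keys in a sorted buffer,
--     # format just those, and derive the suffix from the total count
--     best: List[str] = []
--     for k in collisions:
--         if len(best) < _MAX_TEMPLATE_API_ERROR_ITEMS:
--             _insert_bounded(best, k)
--         elif k < best[-1]: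
--             _insert_bounded(best, k)
--             best.pop()
--     preview = [_fmt_entry(collisions, k) for k in best]
--     suffix = f" (+{len(collisions) - len(preview)} more)" if len(collisions) > len(preview) else ""
--     return (
--         "Ambiguous API Fill keys after normalization: "
--         f"{', '.join(preview)}{suffix}. Use exactly one spelling per key."
--     )
-- ===== Notes on version B (the rewrite author's own statement) =====
-- stated objective: faster
-- what changed: Replaces full sort + format-everything-then-truncate with a single bounded-insertion pass that keeps only the 25 lexicographically smallest keys and formats just those, deriving the '+N more' suffix from the total count.
import Mathlib
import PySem

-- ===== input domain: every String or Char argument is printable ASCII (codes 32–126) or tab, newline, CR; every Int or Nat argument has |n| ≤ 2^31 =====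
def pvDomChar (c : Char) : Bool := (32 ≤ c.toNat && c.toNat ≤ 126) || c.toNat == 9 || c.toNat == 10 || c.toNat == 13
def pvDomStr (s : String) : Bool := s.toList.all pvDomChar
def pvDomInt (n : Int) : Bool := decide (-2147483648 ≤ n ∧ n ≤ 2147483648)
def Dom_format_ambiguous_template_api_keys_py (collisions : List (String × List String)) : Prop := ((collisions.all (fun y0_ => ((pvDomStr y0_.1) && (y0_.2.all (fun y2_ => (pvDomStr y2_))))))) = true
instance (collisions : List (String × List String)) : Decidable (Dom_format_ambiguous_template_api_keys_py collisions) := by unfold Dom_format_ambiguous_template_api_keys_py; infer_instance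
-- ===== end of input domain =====

-- B keeps only the 25 smallest keys via a bounded insertion pass and formats just those,
-- instead of sorting and formatting every key and then truncating (objective: faster).


-- shared helper: the per-key formatting line, identical in A and B
-- (`str(key or "")` on a str is the string itself when nonempty, "" otherwise — ported literally)
def pvFmtEntry (collisions : List (String × List String)) (normalized_key : String) : String :=
  let vals := (PySem.Dict.mk collisions).getD normalized_key []
  let raw_keys := PySem.List.sorted
    (PySem.Set.ofList ((vals.map (fun key => PySem.Str.strip (if key = "" then "" else key))).filter (fun s => s ≠ "")))
    (fun x => x) false
  if raw_keys ≠ [] then normalized_key ++ " [" ++ PySem.Str.join ", " raw_keys ++ "]"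
  else normalized_key

-- ===== PORT A =====
def format_ambiguous_template_api_keys_py (collisions : List (String × List String)) : String :=
  let formatted := (PySem.List.sorted (collisions.map Prod.fst) (fun x => x) false).foldl
    (fun acc normalized_key => acc ++ [pvFmtEntry collisions normalized_key]) []
  let preview := PySem.List.slice formatted none (some (25 : Int))
  let suffix := if formatted.length > preview.length
    then " (+" ++ PySem.Int.toStr ((formatted.length : Int) - (preview.length : Int)) ++ " more)"
    else ""
  "Ambiguous API Fill keys after normalization: " ++ PySem.Str.join ", " preview ++ suffix
    ++ ". Use exactly one spelling per key."

-- ===== PORT B =====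
-- the while-loop of _insert_bounded: walk past elements ≤ key, insert key there
def pvInsLoop : List String → String → List String
  | [], key => [key]
  | y :: t, key => if y ≤ key then y :: pvInsLoop t key else key :: y :: t

-- one iteration of B's selection loop over the keys
def pvStep (best : List String) (k : String) : List String :=
  if best.length < 25 then pvInsLoop best k
  else if k < best.getLastD "" then (pvInsLoop best k).dropLast
  else best

def format_ambiguous_template_api_keys_py_alt (collisions : List (String × List String)) : String :=
  let best := collisions.foldl (fun best kv => pvStep best kv.1) []
  let preview := best.map (fun k => pvFmtEntry collisions k)
  let suffix := if collisions.length > preview.length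
    then " (+" ++ PySem.Int.toStr ((collisions.length : Int) - (preview.length : Int)) ++ " more)"
    else ""
  "Ambiguous API Fill keys after normalization: " ++ PySem.Str.join ", " preview ++ suffix
    ++ ". Use exactly one spelling per key."

-- ===== PRECONDITION & SPEC =====
def Spec_format_ambiguous_template_api_keys_py (collisions : List (String × List String)) (out : String) : Prop := out = format_ambiguous_template_api_keys_py_alt collisions
instance (collisions : List (String × List String)) (out : String) : Decidable (Spec_format_ambiguous_template_api_keys_py collisions out) := by unfold Spec_format_ambiguous_template_api_keys_py; infer_instance

-- ===== CLAIM (what is proved, stated in full; the proofs are below) =====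
def Claim_equal_format_ambiguous_template_api_keys_py : Prop := ∀ (collisions : List (String × List String)), Dom_format_ambiguous_template_api_keys_py collisions → Spec_format_ambiguous_template_api_keys_py collisions (format_ambiguous_template_api_keys_py collisions)

-- ===== LEMMAS AND PROOFS =====

theorem pvInsLoop_perm (l : List String) (k : String) : (pvInsLoop l k).Perm (k :: l) := by
  induction l with
  | nil => simp [pvInsLoop]
  | cons y t ih =>
    simp only [pvInsLoop]
    split
    · exact ((ih.cons y).trans (List.Perm.swap k y t))
    · exact List.Perm.refl _

theorem pvInsLoop_length (l : List String) (k : String) :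
    (pvInsLoop l k).length = l.length + 1 := (pvInsLoop_perm l k).length_eq

theorem pvInsLoop_pairwise (l : List String) (k : String) (h : l.Pairwise (· ≤ ·)) :
    (pvInsLoop l k).Pairwise (· ≤ ·) := by
  induction l with
  | nil => simp [pvInsLoop]
  | cons y t ih =>
    rcases List.pairwise_cons.mp h with ⟨hy, ht⟩
    simp only [pvInsLoop]
    split
    · rename_i hyk
      refine List.pairwise_cons.mpr ⟨?_, ih ht⟩
      intro z hz
      rcases List.mem_cons.mp ((pvInsLoop_perm t k).mem_iff.mp hz) with hz | hz
      · subst hz; exact hyk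
      · exact hy z hz
    · rename_i hyk
      have hky : k ≤ y := le_of_lt (lt_of_not_ge hyk)
      refine List.pairwise_cons.mpr ⟨?_, h⟩
      intro z hz
      rcases List.mem_cons.mp hz with hz | hz
      · subst hz; exact hky
      · exact le_trans hky (hy z hz)

theorem pvInsLoop_of_all_le (l : List String) (k : String) (h : ∀ y ∈ l, y ≤ k) :
    pvInsLoop l k = l ++ [k] := by
  induction l with
  | nil => simp [pvInsLoop]
  | cons y t ih =>
    have hy : y ≤ k := h y (List.mem_cons_self ..)
    simp only [pvInsLoop, if_pos hy, List.cons_append]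
    rw [ih (fun z hz => h z (List.mem_cons_of_mem _ hz))]

-- insertion into a sorted list commutes with truncation to the first n elements
theorem pvInsLoop_take (l : List String) (n : Nat) (k : String) :
    (pvInsLoop l k).take n = (pvInsLoop (l.take n) k).take n := by
  induction l generalizing n with
  | nil => simp
  | cons y t ih =>
    cases n with
    | zero => simp
    | succ m =>
      simp only [List.take_succ_cons, pvInsLoop]
      by_cases hyk : y ≤ k
      · rw [if_pos hyk, if_pos hyk, List.take_succ_cons, List.take_succ_cons, ih m]
      · rw [if_neg hyk, if_neg hyk]
        cases m with
        | zero => simp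
        | succ p =>
          simp only [List.take_succ_cons]
          rw [List.take_take, Nat.min_eq_left (Nat.le_succ p)]

-- sorted of one more key is insertion into the sorted list
theorem sorted_append_singleton (xs : List String) (k : String) :
    PySem.List.sorted (xs ++ [k]) (fun x => x) false
      = pvInsLoop (PySem.List.sorted xs (fun x => x) false) k := by
  apply PySem.List.sorted_id_eq_of_perm_of_pairwise
  · have h1 : (pvInsLoop (PySem.List.sorted xs (fun x => x) false) k).Perm
        (k :: PySem.List.sorted xs (fun x => x) false) := pvInsLoop_perm _ _
    have h2 : (k :: PySem.List.sorted xs (fun x => x) false).Perm (k :: xs) :=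
      (PySem.List.sorted_perm xs (fun x => x) false).cons k
    have h3 : (k :: xs).Perm (xs ++ [k]) := by
      simpa using (List.perm_append_comm (l₁ := [k]) (l₂ := xs))
    exact (h1.trans h2).trans h3
  · exact pvInsLoop_pairwise _ k (by simpa using PySem.List.sorted_pairwise xs (fun x => x))

-- the last element of a nonempty sorted list bounds all its elements
theorem pairwise_le_getLast (l : List String) (h : l.Pairwise (· ≤ ·)) (m : String)
    (hm : l.getLast? = some m) : ∀ y ∈ l, y ≤ m := by
  induction l with
  | nil => simp at hm
  | cons y t ih =>
    rcases List.pairwise_cons.mp h with ⟨hy, ht⟩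
    cases t with
    | nil =>
      simp only [List.getLast?_singleton, Option.some.injEq] at hm
      subst hm; intro z hz; simp at hz; simp [hz]
    | cons a s =>
      have hm' : (a :: s).getLast? = some m := by
        rw [List.getLast?_cons_cons] at hm; exact hm
      intro z hz
      rcases List.mem_cons.mp hz with hz | hz
      · subst hz
        exact le_trans (hy a (List.mem_cons_self ..)) (ih ht hm' a (List.mem_cons_self ..))
      · exact ih ht hm' z hz

-- one bounded-insertion step equals insertion followed by truncation, on a sorted buffer
theorem pvStep_eq (b : List String) (k : String) (hp : b.Pairwise (· ≤ ·)) (hl : b.length ≤ 25) :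
    pvStep b k = (pvInsLoop b k).take 25 := by
  unfold pvStep
  by_cases h : b.length < 25
  · rw [if_pos h, List.take_of_length_le (by rw [pvInsLoop_length]; omega)]
  · rw [if_neg h]
    have hb25 : b.length = 25 := by omega
    have hne : b ≠ [] := by intro e; subst e; simp at hb25
    obtain ⟨m, hm⟩ := Option.isSome_iff_exists.mp (List.getLast?_isSome.mpr hne)
    have hd : b.getLastD "" = m := by rw [List.getLastD_eq_getLast?, hm]; rfl
    rw [hd]
    by_cases hkm : k < m
    · rw [if_pos hkm, List.dropLast_eq_take, pvInsLoop_length, hb25]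
    · rw [if_neg hkm]
      have hall : ∀ y ∈ b, y ≤ k := fun y hy =>
        le_trans (pairwise_le_getLast b hp m hm y hy) (le_of_not_gt hkm)
      rw [pvInsLoop_of_all_le b k hall, List.take_append_of_le_length (by omega),
        List.take_of_length_le (by omega)]

-- B's selection loop computes the first 25 elements of the fully sorted key list
theorem foldl_pvStep (keys : List String) :
    keys.foldl pvStep [] = (PySem.List.sorted keys (fun x => x) false).take 25 := by
  induction keys using List.reverseRecOn with
  | nil => rfl
  | append_singleton xs k ih =>
    rw [List.foldl_append, List.foldl_cons, List.foldl_nil, ih, sorted_append_singleton]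
    have hp : ((PySem.List.sorted xs (fun x => x) false).take 25).Pairwise (· ≤ ·) :=
      List.Pairwise.sublist (List.take_sublist _ _)
        (by simpa using PySem.List.sorted_pairwise xs (fun x => x))
    rw [pvStep_eq _ k hp (by simp), ← pvInsLoop_take]

-- ===== VERDICT (by name: the statement is the Claim_ definition above) =====
theorem format_ambiguous_template_api_keys_py_spec : Claim_equal_format_ambiguous_template_api_keys_py := by
  intro collisions _
  unfold Spec_format_ambiguous_template_api_keys_py
  unfold format_ambiguous_template_api_keys_py format_ambiguous_template_api_keys_py_alt
  have hfold : collisions.foldl (fun best kv => pvStep best kv.1) []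
      = (PySem.List.sorted (collisions.map Prod.fst) (fun x => x) false).take 25 := by
    rw [← foldl_pvStep, ← List.foldl_map]
  have hfmt : (PySem.List.sorted (collisions.map Prod.fst) (fun x => x) false).foldl
      (fun acc normalized_key => acc ++ [pvFmtEntry collisions normalized_key]) []
      = (PySem.List.sorted (collisions.map Prod.fst) (fun x => x) false).map (pvFmtEntry collisions) := by
    simpa using PySem.List.foldl_append_singleton_eq_map
      (l := PySem.List.sorted (collisions.map Prod.fst) (fun x => x) false)
      (f := pvFmtEntry collisions) (acc := [])
  simp only [hfold, hfmt]
  rw [PySem.List.slice_to _ (by norm_num), show ((25 : Int)).toNat = 25 from rfl,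
    ← List.map_take]
  have hlen : (PySem.List.sorted (collisions.map Prod.fst) (fun x => x) false).length
      = collisions.length := by
    rw [PySem.List.length_sorted, List.length_map]
  simp [hlen]
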